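-- pv_equiv track=rewrite | github.com/HyeonIn/StudyNote | 코딩역량인증제준비/etc/카카오2021기출/신규아이디추천.py | solution
-- ===== SOURCE A (Python) =====
-- def solution(new_id):
--     answer = []
--     ban = ['~', '!', '@', '#', '$', '%', '^', '&', '*', '(', ')', '=', '+', '[', '{', ']', '}', ':', '?', "'", ',', '<',
--            '>', '/']
--
--     is_dot = False
--
--     new_id2 = []
--
--     for i in range(len(new_id)):
--         if new_id[i] == ".":
--             if len(new_id2) == 0:
--                 continue
--             else:
--                 if is_dot:
--                     continue
--                 else:
--                     new_id2.append(new_id[i])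
--                     is_dot = True
--         else:
--             is_dot = False
--             if 65 <= ord(new_id[i]) <= 90:
--                 new_id2.append(chr(ord(new_id[i]) + 32))
--             elif new_id[i] in ban:
--                 continue
--             else:
--                 new_id2.append(new_id[i])
--     is_dot = False
--     for i in new_id2:
--         if i == ".":
--             if len(answer) == 0:
--                 continue
--             else:
--                 if is_dot:
--                     continue
--                 else:
--                     answer.append(i)
--                     is_dot = True
--         else:
--             is_dot = False
--             answer.append(i)
--     if len(answer) != 0:
--         if answer[-1] == ".":
--             del answer[-1]
--
--     while len(answer) < 3:
--         if len(answer) == 0: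
--             answer = ['a', 'a', 'a']
--         else:
--             answer.append(answer[-1])
--
--     if len(answer) > 15:
--         answer = answer[0:15]
--         if answer[-1] == ".":
--             del answer[-1]
--
--     answer = "".join(answer)
--
--     return answer
-- ===== SOURCE B (Python) =====
-- def solution(new_id):
--     ban = set("~!@#$%^&*()=+[{]}:?',<>/")
--     s = "".join(c for c in new_id.lower() if c not in ban)
--     s = ".".join(p for p in s.split(".") if p)
--     if not s:
--         s = "a"
--     if len(s) > 15:
--         s = s[:15].removesuffix(".")
--     return s.ljust(3, s[-1])
-- ===== Notes on version B (the rewrite author's own statement) =====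
-- stated objective: idiomatic
-- what changed: A's two stateful ord/is_dot character loops plus list surgery are replaced by declarative whole-string passes: lowercase+filter the banned characters, split on the dot character / drop empty pieces / rejoin (which collapses dot runs and strips boundary dots in one step), truncate with removesuffix, and pad with ljust.
import Mathlib
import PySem

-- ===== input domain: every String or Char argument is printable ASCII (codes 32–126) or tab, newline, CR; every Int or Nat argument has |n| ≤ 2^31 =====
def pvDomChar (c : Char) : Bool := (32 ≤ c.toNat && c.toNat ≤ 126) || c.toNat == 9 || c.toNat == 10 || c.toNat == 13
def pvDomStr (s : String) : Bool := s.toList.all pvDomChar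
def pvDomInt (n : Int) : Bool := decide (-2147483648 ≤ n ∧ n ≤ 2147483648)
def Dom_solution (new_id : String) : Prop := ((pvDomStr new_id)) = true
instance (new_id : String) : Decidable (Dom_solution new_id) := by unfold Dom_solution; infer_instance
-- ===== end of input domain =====

-- B replaces A's two stateful ord-based character loops by declarative passes
-- (lowercase+filter, split on '.' / drop empties / rejoin, truncate, pad); objective: idiomatic.

-- ===== PORT A =====
def banA : List Char := ['~','!','@','#','$','%','^','&','*','(',')','=','+','[','{',']','}',':','?','\'',',','<','>','/']

-- first for-loop of A: state = (new_id2 accumulator, is_dot flag)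
def loop1 : List Char → List Char → Bool → List Char
  | [], acc, _ => acc
  | c :: t, acc, isDot =>
    if c = '.' then
      if acc.isEmpty then loop1 t acc isDot
      else if isDot then loop1 t acc isDot
      else loop1 t (acc ++ ['.']) true
    else
      if 65 ≤ c.toNat ∧ c.toNat ≤ 90 then loop1 t (acc ++ [Char.ofNat (c.toNat + 32)]) false
      else if c ∈ banA then loop1 t acc false
      else loop1 t (acc ++ [c]) false

-- second for-loop of A: state = (answer accumulator, is_dot flag)
def loop2 : List Char → List Char → Bool → List Char
  | [], acc, _ => acc
  | c :: t, acc, isDot =>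
    if c = '.' then
      if acc.isEmpty then loop2 t acc isDot
      else if isDot then loop2 t acc isDot
      else loop2 t (acc ++ ['.']) true
    else loop2 t (acc ++ [c]) false

-- "if len(answer) != 0: if answer[-1] == '.': del answer[-1]"
def stripTrail (l : List Char) : List Char := if l.getLast? = some '.' then l.dropLast else l

-- "while len(answer) < 3: …"
def padA (l : List Char) : List Char :=
  if l.length < 3 then
    if l.length = 0 then padA ['a', 'a', 'a'] else padA (l ++ [l.getLast!])
  else l
termination_by 3 - l.length
decreasing_by all_goals (simp_all; try omega)

def solution (new_id : String) : String :=
  let newId2 := loop1 new_id.toList [] false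
  let answer := loop2 newId2 [] false
  let answer := stripTrail answer
  let answer := padA answer
  let answer := if 15 < answer.length then stripTrail (answer.take 15) else answer
  String.ofList answer

-- ===== PORT B =====
def banB : PySem.Set Char := PySem.Set.ofList "~!@#$%^&*()=+[{]}:?',<>/".toList

-- "s[:15].removesuffix('.')" 's removesuffix
def removeSuffixDot (s : List Char) : List Char :=
  if PySem.Chars.endswith s ['.'] then s.dropLast else s

def solution_alt (new_id : String) : String :=
  let s := (PySem.Str.lower new_id).toList.filter (fun c => !(PySem.Set.contains banB c))
  let s := PySem.Chars.join ['.'] ((PySem.Chars.splitOn s ['.']).filter (fun p => !p.isEmpty))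
  let s := if s.isEmpty then ['a'] else s
  let s := if 15 < s.length then removeSuffixDot (s.take 15) else s
  -- "s.ljust(3, s[-1])" (s is nonempty here; getLastD's default is never read)
  String.ofList (if s.length < 3 then s ++ List.replicate (3 - s.length) (s.getLastD 'a') else s)

-- ===== PRECONDITION & SPEC =====
def Spec_solution (new_id : String) (out : String) : Prop := out = solution_alt new_id
instance (new_id : String) (out : String) : Decidable (Spec_solution new_id out) := by unfold Spec_solution; infer_instance

-- ===== CLAIM (what is proved, stated in full; the proofs are below) =====
def Claim_equal_solution : Prop := ∀ (new_id : String), Dom_solution new_id → Spec_solution new_id (solution new_id)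

-- ===== LEMMAS AND PROOFS =====

-- flag-state versions of A's two loops (ne = "accumulator is nonempty")
def fl : List Char → Bool → Bool → List Char
  | [], _, _ => []
  | c :: t, ne, d =>
    if c = '.' then
      if ne = false then fl t ne d
      else if d then fl t ne d
      else '.' :: fl t true true
    else
      if 65 ≤ c.toNat ∧ c.toNat ≤ 90 then Char.ofNat (c.toNat + 32) :: fl t true false
      else if c ∈ banA then fl t ne false
      else c :: fl t true false

def sl : List Char → Bool → Bool → List Char
  | [], _, _ => []
  | c :: t, ne, d =>
    if c = '.' then
      if ne = false then sl t ne d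
      else if d then sl t ne d
      else '.' :: sl t true true
    else c :: sl t true false

-- the per-character transform of A's first loop, dots kept
def mf : List Char → List Char
  | [] => []
  | c :: t =>
    if c = '.' then '.' :: mf t
    else if 65 ≤ c.toNat ∧ c.toNat ≤ 90 then Char.ofNat (c.toNat + 32) :: mf t
    else if c ∈ banA then mf t
    else c :: mf t

-- split on '.' with a partial-segment accumulator (specification of PySem's splitOn for sep = ".")
def splitDot (pre : List Char) : List Char → List (List Char)
  | [] => [pre]
  | c :: t => if c = '.' then pre :: splitDot [] t else splitDot (pre ++ [c]) t

-- join with '.'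
def jd : List (List Char) → List Char
  | [] => []
  | [w] => w
  | w :: ws => w ++ '.' :: jd ws

lemma isEmpty_append_singleton (acc : List Char) (x : Char) :
    (acc ++ [x]).isEmpty = false := by cases acc <;> simp

lemma loop1_eq_fl (t : List Char) : ∀ (acc : List Char) (d : Bool),
    loop1 t acc d = acc ++ fl t (!acc.isEmpty) d := by
  induction t with
  | nil => intro acc d; simp [loop1, fl]
  | cons c t ih =>
    intro acc d
    by_cases hc : c = '.'
    · subst hc
      cases acc with
      | nil => simpa [loop1, fl] using ih [] d
      | cons a as =>
        cases d
        · simp [loop1, fl, ih]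
        · simp [loop1, fl, ih]
    · by_cases hu : 65 ≤ c.toNat ∧ c.toNat ≤ 90
      · simp [loop1, fl, hc, hu, ih, isEmpty_append_singleton]
      · by_cases hb : c ∈ banA
        · simp [loop1, fl, hc, hu, hb, ih]
        · simp [loop1, fl, hc, hu, hb, ih, isEmpty_append_singleton]

lemma loop2_eq_sl (t : List Char) : ∀ (acc : List Char) (d : Bool),
    loop2 t acc d = acc ++ sl t (!acc.isEmpty) d := by
  induction t with
  | nil => intro acc d; simp [loop2, sl]
  | cons c t ih =>
    intro acc d
    by_cases hc : c = '.'
    · subst hc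
      cases acc with
      | nil => simpa [loop2, sl] using ih [] d
      | cons a as =>
        cases d
        · simp [loop2, sl, ih]
        · simp [loop2, sl, ih]
    · simp [loop2, sl, hc, ih, isEmpty_append_singleton]

-- step equations for the flag-state loops
lemma sl_dot_f (t : List Char) (d : Bool) : sl ('.' :: t) false d = sl t false d := by simp [sl]
lemma sl_dot_tt (t : List Char) : sl ('.' :: t) true true = sl t true true := by simp [sl]
lemma sl_dot_tf (t : List Char) : sl ('.' :: t) true false = '.' :: sl t true true := by
  simp [sl]
lemma sl_cons (c : Char) (hc : c ≠ '.') (t : List Char) (ne d : Bool) :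
    sl (c :: t) ne d = c :: sl t true false := by simp [sl, hc]

lemma uplow_ne_dot (c : Char) (hu : 65 ≤ c.toNat ∧ c.toNat ≤ 90) :
    Char.ofNat (c.toNat + 32) ≠ '.' := by
  intro h
  have h46 : (Char.ofNat (c.toNat + 32)).toNat = 46 := by rw [h]; decide
  have hv : (Char.ofNat (c.toNat + 32)).toNat = c.toNat + 32 := by
    rw [Char.toNat_ofNat, if_pos (Or.inl (by omega : c.toNat + 32 < 0xd800))]
  omega

-- second loop absorbs the partial dot-collapsing the first loop already did
lemma sl_fl_eq_sl_mf (s : List Char) : ∀ (ne d1 d2 : Bool), (d1 = true → d2 = true) →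
    sl (fl s ne d1) ne d2 = sl (mf s) ne d2 := by
  induction s with
  | nil => intro ne d1 d2 _; simp [fl, mf]
  | cons c t ih =>
    intro ne d1 d2 hdd
    by_cases hc : c = '.'
    · subst hc
      have hfl : fl ('.' :: t) ne d1
          = if ne = false then fl t ne d1 else if d1 then fl t ne d1
            else '.' :: fl t true true := by simp [fl]
      have hmf : mf ('.' :: t) = '.' :: mf t := by simp [mf]
      rw [hfl, hmf]
      cases ne with
      | false =>
        rw [if_pos rfl, sl_dot_f]
        exact ih false d1 d2 hdd
      | true =>
        rw [if_neg (by simp)]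
        cases d1 with
        | true =>
          have hd2 : d2 = true := hdd rfl
          subst hd2
          rw [if_pos rfl, sl_dot_tt]
          exact ih true true true (fun _ => rfl)
        | false =>
          rw [if_neg (by simp)]
          cases d2 with
          | true =>
            rw [sl_dot_tt, sl_dot_tt]
            exact ih true true true (fun _ => rfl)
          | false =>
            rw [sl_dot_tf, sl_dot_tf]
            rw [ih true true true (fun _ => rfl)]
    · have hmf : mf (c :: t)
          = if 65 ≤ c.toNat ∧ c.toNat ≤ 90 then Char.ofNat (c.toNat + 32) :: mf t
            else if c ∈ banA then mf t else c :: mf t := by simp [mf, hc]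
      have hfl : fl (c :: t) ne d1
          = if 65 ≤ c.toNat ∧ c.toNat ≤ 90 then Char.ofNat (c.toNat + 32) :: fl t true false
            else if c ∈ banA then fl t ne false else c :: fl t true false := by simp [fl, hc]
      rw [hfl, hmf]
      by_cases hu : 65 ≤ c.toNat ∧ c.toNat ≤ 90
      · rw [if_pos hu, if_pos hu, sl_cons _ (uplow_ne_dot c hu), sl_cons _ (uplow_ne_dot c hu)]
        rw [ih true false false (by simp)]
      · rw [if_neg hu, if_neg hu]
        by_cases hb : c ∈ banA
        · rw [if_pos hb, if_pos hb]
          exact ih ne false d2 (by simp)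
        · rw [if_neg hb, if_neg hb, sl_cons _ hc, sl_cons _ hc]
          rw [ih true false false (by simp)]

-- in the skip states (nothing emitted yet / just emitted a dot) sl behaves identically
lemma sl_tt_eq_ff (t : List Char) : sl t true true = sl t false false := by
  induction t with
  | nil => simp [sl]
  | cons c t ih =>
    by_cases hc : c = '.'
    · subst hc; simp [sl, ih]
    · simp [sl, hc]

lemma sl_ff_eq_nil_iff (t : List Char) : sl t false false = [] ↔ t.all (· = '.') = true := by
  induction t with
  | nil => simp [sl]
  | cons c t ih =>
    by_cases hc : c = '.'
    · subst hc; simpa [sl] using ih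
    · simp [sl, hc]

lemma splitDot_filter_nil_iff (t : List Char) : ∀ (pre : List Char),
    ((splitDot pre t).filter (fun p => !p.isEmpty) = []) ↔ (pre = [] ∧ t.all (· = '.') = true) := by
  induction t with
  | nil =>
    intro pre
    cases pre <;> simp [splitDot, List.filter]
  | cons c t ih =>
    intro pre
    by_cases hc : c = '.'
    · subst hc
      cases pre with
      | nil => simpa [splitDot] using ih []
      | cons a as => simp [splitDot, List.filter]
    · simp only [splitDot, if_neg hc, ih (pre ++ [c])]
      simp [hc]

lemma stripTrail_cons (c : Char) (hc : c ≠ '.') (l : List Char) :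
    stripTrail (c :: l) = c :: stripTrail l := by
  cases l with
  | nil => simp [stripTrail, hc]
  | cons a as => simp [stripTrail, List.getLast?_cons_cons]; split_ifs <;> simp

lemma stripTrail_dot_cons (l : List Char) (hl : l ≠ []) :
    stripTrail ('.' :: l) = '.' :: stripTrail l := by
  cases l with
  | nil => simp at hl
  | cons a as => simp [stripTrail, List.getLast?_cons_cons]; split_ifs <;> simp

-- the main induction: A's collapsed-and-trailing-dot-stripped output is B's split/filter/join
lemma main_split (l : List Char) :
    (∀ pre : List Char, pre ≠ [] →
      pre ++ stripTrail (sl l true false) = jd ((splitDot pre l).filter (fun p => !p.isEmpty)))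
    ∧ stripTrail (sl l false false) = jd ((splitDot [] l).filter (fun p => !p.isEmpty)) := by
  induction l with
  | nil =>
    constructor
    · intro pre hpre
      cases pre with
      | nil => simp at hpre
      | cons a as => simp [sl, stripTrail, splitDot, List.filter, jd]
    · simp [sl, stripTrail, splitDot, List.filter, jd]
  | cons c t ih =>
    by_cases hc : c = '.'
    · subst hc
      constructor
      · intro pre hpre
        have hsl : sl ('.' :: t) true false = '.' :: sl t false false := by
          simp [sl, sl_tt_eq_ff]
        have hsd : splitDot pre ('.' :: t) = pre :: splitDot [] t := by simp [splitDot]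
        rw [hsl, hsd]
        have hpre' : (pre :: splitDot [] t).filter (fun p => !p.isEmpty)
            = pre :: (splitDot [] t).filter (fun p => !p.isEmpty) := by
          simp [List.filter, List.isEmpty_eq_false_iff.2 hpre]
        rw [hpre']
        by_cases hr : (splitDot [] t).filter (fun p => !p.isEmpty) = []
        · have ht : sl t false false = [] := by
            rw [sl_ff_eq_nil_iff]
            exact ((splitDot_filter_nil_iff t []).1 hr).2
          rw [ht, hr]
          simp [stripTrail, jd]
        · have ht : sl t false false ≠ [] := by
            intro h
            exact hr ((splitDot_filter_nil_iff t []).2 ⟨rfl, (sl_ff_eq_nil_iff t).1 h⟩)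
          rw [stripTrail_dot_cons _ ht, ih.2]
          rcases hw : (splitDot [] t).filter (fun p => !p.isEmpty) with - | ⟨w, ws⟩
          · exact absurd hw hr
          · simp [jd]
      · have hsl : sl ('.' :: t) false false = sl t false false := by simp [sl]
        have hsd : splitDot [] ('.' :: t) = [] :: splitDot [] t := by simp [splitDot]
        rw [hsl, hsd]
        have : (([] : List Char) :: splitDot [] t).filter (fun p => !p.isEmpty)
            = (splitDot [] t).filter (fun p => !p.isEmpty) := by simp [List.filter]
        rw [this]
        exact ih.2
    · have hsl : ∀ ne d, sl (c :: t) ne d = c :: sl t true false := by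
        intro ne d; simp [sl, hc]
      constructor
      · intro pre hpre
        rw [hsl, stripTrail_cons c hc]
        have : pre ++ c :: stripTrail (sl t true false)
            = (pre ++ [c]) ++ stripTrail (sl t true false) := by simp
        rw [this, (ih.1 (pre ++ [c]) (by simp))]
        simp [splitDot, hc]
      · rw [hsl, stripTrail_cons c hc]
        have := ih.1 [c] (by simp)
        simp only [List.singleton_append] at this
        rw [this]
        simp [splitDot, hc]

-- PySem's splitOn.go for sep = "." is splitDot, given enough fuel
lemma splitOn_go_eq (fuel : Nat) : ∀ (l cur : List Char) (accs : List (List Char)),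
    l.length < fuel →
    PySem.Chars.splitOn.go ['.'] fuel l cur accs = accs.reverse ++ splitDot cur.reverse l := by
  induction fuel with
  | zero => intro l cur accs h; omega
  | succ fuel ih =>
    intro l cur accs h
    cases l with
    | nil => simp [PySem.Chars.splitOn.go, splitDot]
    | cons c rest =>
      by_cases hc : c = '.'
      · subst hc
        have hp : List.isPrefixOf ['.'] ('.' :: rest) = true := by
          simp [List.isPrefixOf]
        simp only [PySem.Chars.splitOn.go, hp]
        rw [ih _ _ _ (by simpa using Nat.lt_of_succ_lt_succ h)]
        simp [splitDot]
      · have hp : List.isPrefixOf ['.'] (c :: rest) = false := by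
          simp [List.isPrefixOf]
          exact fun h => absurd h.symm hc
        simp only [PySem.Chars.splitOn.go, hp, Bool.false_eq_true, if_false]
        rw [ih _ _ _ (by simpa using Nat.lt_of_succ_lt_succ h)]
        simp [splitDot, hc]

lemma splitOn_eq_splitDot (s : List Char) :
    PySem.Chars.splitOn s ['.'] = splitDot [] s := by
  unfold PySem.Chars.splitOn
  rw [splitOn_go_eq (s.length + 1) s [] [] (by omega)]
  simp

lemma join_eq_jd (ws : List (List Char)) : PySem.Chars.join ['.'] ws = jd ws := by
  induction ws with
  | nil => simp [PySem.Chars.join, List.intercalate, jd]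
  | cons w ws ih =>
    cases ws with
    | nil => simp [PySem.Chars.join, List.intercalate, jd]
    | cons v vs =>
      simp only [PySem.Chars.join, List.intercalate, List.intersperse] at *
      simp [jd, ← ih]

lemma banB_eq_banA : (banB : List Char) = banA := by decide

lemma charle (a c : Char) : (a ≤ c) ↔ a.toNat ≤ c.toNat := by
  rw [Char.le_def, UInt32.le_iff_toNat_le]; rfl

-- B's lowercase-then-filter pass is A's per-character transform
lemma lower_filter_eq_mf (l : List Char) :
    (PySem.Chars.lower l).filter (fun c => !(PySem.Set.contains banB c)) = mf l := by
  have hfun : (fun c => !(PySem.Set.contains banB c)) = (fun c => !decide (c ∈ banA)) := by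
    funext c
    simp [PySem.Set.contains, banB_eq_banA, List.contains_eq_mem]
  rw [hfun]
  induction l with
  | nil => simp [PySem.Chars.lower, mf]
  | cons c t ih =>
    simp only [PySem.Chars.lower, List.map_cons, List.filter_cons] at *
    by_cases hc : c = '.'
    · subst hc
      have h1 : PySem.Chars.lowerChar '.' = '.' := by decide
      have h2 : ('.' : Char) ∉ banA := by decide
      simp [h1, h2, mf, ih]
    · by_cases hu : 65 ≤ c.toNat ∧ c.toNat ≤ 90
      · have hup : PySem.Chars.isupper c = true := by
          unfold PySem.Chars.isupper
          have h1 : 'A' ≤ c := by rw [charle]; exact hu.1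
          have h2 : c ≤ 'Z' := by rw [charle]; exact hu.2
          simp [h1, h2]
        have hl : PySem.Chars.lowerChar c = Char.ofNat (c.toNat + 32) := by
          simp [PySem.Chars.lowerChar, hup]
        have hnb : Char.ofNat (c.toNat + 32) ∉ banA := by
          intro hmem
          have hv : (Char.ofNat (c.toNat + 32)).toNat = c.toNat + 32 := by
            rw [Char.toNat_ofNat, if_pos (Or.inl (by omega : c.toNat + 32 < 0xd800))]
          have hall : banA.all (fun x => !(97 ≤ x.toNat && x.toNat ≤ 122)) = true := by decide
          have := List.all_eq_true.1 hall _ hmem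
          simp [hv] at this
          omega
        simp [hl, hnb, mf, hc, hu, ih]
      · have hup : PySem.Chars.isupper c = false := by
          cases h : PySem.Chars.isupper c with
          | false => rfl
          | true =>
            exfalso
            unfold PySem.Chars.isupper at h
            rw [Bool.and_eq_true, decide_eq_true_iff, decide_eq_true_iff, charle, charle] at h
            exact hu ⟨h.1, h.2⟩
        have hl : PySem.Chars.lowerChar c = c := by
          simp [PySem.Chars.lowerChar, hup]
        by_cases hb : c ∈ banA
        · simp [hl, hb, mf, hc, hu, ih]
        · simp [hl, hb, mf, hc, hu, ih]

-- the collapsed core has no empty string issue: bridge "s.isEmpty" to []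
lemma padA_nil : padA [] = ['a', 'a', 'a'] := by
  rw [padA]; norm_num; rw [padA]; norm_num

lemma padA_one (x : Char) : padA [x] = [x, x, x] := by
  rw [padA]; norm_num
  rw [padA]; norm_num
  rw [padA]; norm_num

lemma padA_two (x y : Char) : padA [x, y] = [x, y, y] := by
  rw [padA]; norm_num
  rw [padA]; norm_num

lemma padA_big (x y z : Char) (t : List Char) : padA (x :: y :: z :: t) = x :: y :: z :: t := by
  rw [padA]; norm_num

lemma endswith_dot (l : List Char) :
    PySem.Chars.endswith l ['.'] = true ↔ l.getLast? = some '.' := by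
  rw [PySem.Chars.endswith_iff]
  constructor
  · rintro ⟨t, rfl⟩; simp
  · intro h
    rcases l with - | ⟨a, as⟩
    · simp at h
    · have hne : (a :: as) ≠ [] := by simp
      refine ⟨(a :: as).dropLast, ?_⟩
      conv_rhs => rw [← List.dropLast_concat_getLast hne]
      rw [List.getLast?_eq_some_getLast hne] at h
      simp only [Option.some.injEq] at h
      rw [h]

lemma removeSuffixDot_eq_stripTrail (l : List Char) : removeSuffixDot l = stripTrail l := by
  unfold removeSuffixDot stripTrail
  split_ifs with h1 h2 h2
  · rfl
  · exact absurd ((endswith_dot l).1 h1) h2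
  · exact absurd ((endswith_dot l).2 h2) (by simp [h1])
  · rfl

-- the dot-free-word invariant: B's joined core never ends in '.', so no further interaction;
-- instead we only need lengths/last of the shared core, handled in the final assembly below.

lemma stripTrail_length_ge (l : List Char) : l.length - 1 ≤ (stripTrail l).length := by
  unfold stripTrail
  split_ifs <;> simp

theorem solution_spec : Claim_equal_solution := by
  unfold Claim_equal_solution
  intro new_id _
  unfold Spec_solution solution solution_alt
  simp only []
  -- common core
  have hcore :
      stripTrail (loop2 (loop1 new_id.toList [] false) [] false)
      = PySem.Chars.join ['.'] (((PySem.Chars.splitOn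
          ((PySem.Str.lower new_id).toList.filter (fun c => !(PySem.Set.contains banB c)))
          ['.'])).filter (fun p => !p.isEmpty)) := by
    rw [PySem.Str.toList_lower, lower_filter_eq_mf, splitOn_eq_splitDot, join_eq_jd]
    rw [loop1_eq_fl, loop2_eq_sl]
    simp only [List.isEmpty_nil, Bool.not_true, List.nil_append]
    rw [sl_fl_eq_sl_mf new_id.toList false false false (by simp)]
    exact (main_split (mf new_id.toList)).2
  set core := stripTrail (loop2 (loop1 new_id.toList [] false) [] false) with hc
  rw [← hcore]
  -- now both sides are functions of core
  rcases core with - | ⟨x, - | ⟨y, - | ⟨z, t⟩⟩⟩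
  · -- empty core: A pads to "aaa", B replaces by "a" then ljusts
    rw [padA_nil]
    norm_num [List.replicate]
  · -- length-1 core
    rw [padA_one]
    norm_num [List.replicate]
  · -- length-2 core
    rw [padA_two]
    norm_num [List.replicate]
  · -- length ≥ 3 core
    rw [padA_big]
    have he : ((x :: y :: z :: t).isEmpty = true) = False := by simp
    simp only [he, if_false]
    by_cases h15 : 15 < (x :: y :: z :: t).length
    · -- long core: truncate to 15, strip one trailing dot; result has length ≥ 14 ≥ 3
      rw [if_pos h15, if_pos h15, removeSuffixDot_eq_stripTrail]
      have hlen : ((x :: y :: z :: t).take 15).length = 15 := by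
        simp only [List.length_cons] at h15
        simp only [List.length_take, List.length_cons]
        omega
      have h2 := stripTrail_length_ge ((x :: y :: z :: t).take 15)
      rw [if_neg (by omega)]
    · rw [if_neg h15, if_neg h15, if_neg (by simp only [List.length_cons]; omega)]
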